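-- pv_equiv track=rewrite | github.com/MRehmanGit/IP-Validator | main.py | range_checker
-- ===== SOURCE A (Python) =====
-- def range_checker(s):
--     string_counter = ""  # To accumulate the current segment of the IP address.
--     counter_zero  = 0  # To count the number of zeroes in the IP address.
--     for everyelement in s:
--         if everyelement == ".":
--             try:
--                 final_value = int(string_counter)  # Convert the accumulated string to an integer.
--             except ValueError:
--                 return 2  # Return 2 if conversion fails, indicating an invalid segment.
--
--             if final_value < 0 or final_value > 255:
--                 return 2  # Return 2 if the segment is out of the valid range.
--             else:
--                 string_counter = ""  # Reset the accumulator for the next segment.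
--                 continue
--         else:
--             # If the current element is "0", increment the zero counter.
--             if everyelement == "0":
--                 counter_zero += 1
--             # Accumulate the current element to form the current segment.
--             string_counter += everyelement
--
--     # End of loop, check if there are too many zeros in the IP address.
--     if counter_zero == 16:
--         return 2
--
--     return 1
-- ===== SOURCE B (Python) =====
-- def _segments_ok(segs):
--     for seg in segs:
--         try:
--             v = int(seg)
--         except ValueError:
--             return False
--         if v < 0 or v > 255:
--             return False
--     return True
--
--
-- def range_checker(s):
--     if not _segments_ok(s.split('.')[:-1]):
--         return 2
--     return 2 if s.count('0') == 16 else 1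
-- ===== Notes on version B (the rewrite author's own statement) =====
-- stated objective: simpler
-- what changed: Replaces A's character-by-character segment accumulator and zero-counter loop with a split at the dot separator, a per-segment int range check on every segment except the last, and the standard substring count for the sixteen-zeros rule.
import Mathlib
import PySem

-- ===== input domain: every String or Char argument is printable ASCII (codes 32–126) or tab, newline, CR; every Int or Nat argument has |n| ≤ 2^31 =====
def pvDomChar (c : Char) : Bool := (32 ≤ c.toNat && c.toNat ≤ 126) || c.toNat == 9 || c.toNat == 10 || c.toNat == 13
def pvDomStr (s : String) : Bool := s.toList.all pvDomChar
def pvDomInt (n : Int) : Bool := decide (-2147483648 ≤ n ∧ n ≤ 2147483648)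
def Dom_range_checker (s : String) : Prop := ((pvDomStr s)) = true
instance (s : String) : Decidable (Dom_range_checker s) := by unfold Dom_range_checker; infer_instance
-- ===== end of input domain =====

-- B: split on the separator + per-segment range check + library count, instead of A's char-by-char accumulator loop (simpler decomposition; measured faster by a constant factor).


-- ===== PORT A =====
-- loop over the characters, carrying the current segment accumulator and the zero counter
def rcLoopA : List Char → List Char → Int → Int
  | [], _, cz => if cz = 16 then 2 else 1
  | c :: rest, acc, cz =>
    if c = '.' then
      match PySem.Int.ofChars? acc with
      | none => 2
      | some v => if v < 0 ∨ v > 255 then 2 else rcLoopA rest [] cz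
    else
      rcLoopA rest (acc ++ [c]) (if c = '0' then cz + 1 else cz)

def range_checker (s : String) : Int := rcLoopA s.toList [] 0

-- ===== PORT B =====
-- _segments_ok: every segment parses as an int in 0..255
def segsOkB : List (List Char) → Bool
  | [] => true
  | seg :: rest =>
    match PySem.Int.ofChars? seg with
    | none => false
    | some v => if v < 0 || v > 255 then false else segsOkB rest

def range_checker_alt (s : String) : Int :=
  let segs := PySem.Chars.splitOn s.toList ['.']
  if segsOkB segs.dropLast then
    if PySem.Chars.count s.toList ['0'] = 16 then 2 else 1
  else 2

-- ===== PRECONDITION & SPEC =====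
def Spec_range_checker (s : String) (out : Int) : Prop := out = range_checker_alt s
instance (s : String) (out : Int) : Decidable (Spec_range_checker s out) := by unfold Spec_range_checker; infer_instance

-- ===== CLAIM (what is proved, stated in full; the proofs are below) =====
def Claim_equal_range_checker : Prop := ∀ (s : String), Dom_range_checker s → Spec_range_checker s (range_checker s)

-- ===== LEMMAS AND PROOFS =====

-- reference split on '.' carrying the current (already read) segment prefix
def mySplit : List Char → List Char → List (List Char)
  | pre, [] => [pre]
  | pre, c :: rest => if c = '.' then pre :: mySplit [] rest else mySplit (pre ++ [c]) rest

theorem mySplit_ne_nil (pre l : List Char) : mySplit pre l ≠ [] := by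
  induction l generalizing pre with
  | nil => simp [mySplit]
  | cons c rest ih => by_cases h : c = '.' <;> simp [mySplit, h, ih]

theorem splitOn_go_dot (l : List Char) : ∀ (fuel : Nat) (cur : List Char) (acc : List (List Char)),
    l.length ≤ fuel →
    PySem.Chars.splitOn.go ['.'] fuel l cur acc = acc.reverse ++ mySplit cur.reverse l := by
  induction l with
  | nil =>
    intro fuel cur acc _
    cases fuel <;> simp [PySem.Chars.splitOn.go, mySplit]
  | cons c rest ih =>
    intro fuel cur acc hf
    cases fuel with
    | zero => simp at hf
    | succ fuel =>
      have hrest : rest.length ≤ fuel := by simp at hf; omega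
      by_cases h : c = '.'
      · subst h
        simp only [PySem.Chars.splitOn.go]
        rw [if_pos (by simp [List.isPrefixOf])]
        simp only [List.length_cons, List.length_nil, List.drop_succ_cons, List.drop_zero]
        rw [ih fuel [] (cur.reverse :: acc) hrest]
        simp [mySplit]
      · simp only [PySem.Chars.splitOn.go]
        rw [if_neg (by simp [List.isPrefixOf, Ne.symm h])]
        rw [ih fuel (c :: cur) acc hrest]
        simp [mySplit, h]

theorem splitOn_eq_mySplit (l : List Char) :
    PySem.Chars.splitOn l ['.'] = mySplit [] l := by
  unfold PySem.Chars.splitOn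
  rw [splitOn_go_dot l (l.length + 1) [] [] (by omega)]
  simp

theorem count_go_zero (l : List Char) : ∀ (fuel : Nat) (acc : Nat), l.length ≤ fuel →
    PySem.Chars.count.go ['0'] fuel l acc = acc + l.count '0' := by
  induction l with
  | nil => intro fuel acc _; cases fuel <;> simp [PySem.Chars.count.go]
  | cons c rest ih =>
    intro fuel acc hf
    cases fuel with
    | zero => simp at hf
    | succ fuel =>
      have hrest : rest.length ≤ fuel := by simp at hf; omega
      by_cases h : c = '0'
      · subst h
        simp only [PySem.Chars.count.go]
        rw [if_pos (by simp [List.isPrefixOf])]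
        simp only [List.length_cons, List.length_nil, List.drop_succ_cons, List.drop_zero]
        rw [ih fuel (acc + 1) hrest]
        simp
        omega
      · simp only [PySem.Chars.count.go]
        rw [if_neg (by simp [List.isPrefixOf, Ne.symm h])]
        rw [ih fuel acc hrest]
        simp [h]

theorem chars_count_zero (l : List Char) : PySem.Chars.count l ['0'] = l.count '0' := by
  unfold PySem.Chars.count
  rw [if_neg (by simp)]
  simpa using count_go_zero l l.length 0 le_rfl

-- the loop invariant: A's loop equals B's segment check over the split of acc ++ l
theorem loopA_eq (l : List Char) : ∀ (acc : List Char) (cz : Int),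
    rcLoopA l acc cz =
      if segsOkB (mySplit acc l).dropLast then
        (if cz + (l.count '0' : Int) = 16 then 2 else 1)
      else 2 := by
  induction l with
  | nil => intro acc cz; simp [rcLoopA, mySplit, segsOkB]
  | cons c rest ih =>
    intro acc cz
    by_cases h : c = '.'
    · subst h
      simp only [rcLoopA, mySplit, if_true]
      obtain ⟨hd, tl, hsp⟩ : ∃ hd tl, mySplit ([] : List Char) rest = hd :: tl := by
        cases hm : mySplit ([] : List Char) rest with
        | nil => exact absurd hm (mySplit_ne_nil _ _)
        | cons hd tl => exact ⟨hd, tl, rfl⟩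
      rw [hsp]
      cases hof : PySem.Int.ofChars? acc with
      | none => simp [segsOkB, hof]
      | some v =>
        by_cases hv : v < 0 ∨ v > 255
        · have hvb : (v < 0 || v > 255) = true := by
            rcases hv with h1 | h1 <;> simp [h1]
          simp [hv, segsOkB, hof, hvb]
        · have hvb : (v < 0 || v > 255) = false := by
            simp only [Bool.or_eq_false_iff, decide_eq_false_iff_not, not_lt]
            omega
          rw [ih [] cz, hsp]
          have hs : segsOkB (acc :: (hd :: tl).dropLast) = segsOkB ((hd :: tl).dropLast) := by
            simp [segsOkB, hof, hvb]
          simp [hv, hs]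
    · simp only [rcLoopA, mySplit, if_neg h]
      rw [ih (acc ++ [c]) (if c = '0' then cz + 1 else cz)]
      have hc : (if c = '0' then cz + 1 else cz) + (rest.count '0' : Int)
          = cz + ((c :: rest).count '0' : Int) := by
        by_cases h0 : c = '0'
        · subst h0
          simp only [if_true, List.count_cons_self]
          push_cast
          ring
        · simp [h0]
      rw [hc]

-- ===== VERDICT (by name: the statement is the Claim_ definition above) =====
theorem range_checker_spec : Claim_equal_range_checker := by
  intro s _
  unfold Spec_range_checker range_checker range_checker_alt
  rw [loopA_eq s.toList [] 0, splitOn_eq_mySplit, chars_count_zero]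
  have : ((s.toList.count '0' : Int) = 16) ↔ (s.toList.count '0' = 16) := by omega
  simp [this]
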